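-- pv_equiv track=rewrite | github.com/VincentKleis/PublicProjects | python_programing/DATA110/lab/lab10/oppgave2.py | alle_kombinasjoner
-- ===== SOURCE A (Python) =====
-- tall = [1,2,3,4]
--
-- def alle_kombinasjoner(x:list)-> tuple:
--     liste = []
--     leng = len(x)
--     for i in x:
--         count = 0
--         while leng > count:
--             liste.append((i, tall[count]))
--             count += 1
--
--     return liste
-- ===== SOURCE B (Python) =====
-- tall = [1,2,3,4]
--
-- def alle_kombinasjoner(x: list) -> tuple:
--     n = len(x)
--     return [(x[k // n], tall[k % n]) for k in range(n * n)]
-- ===== Notes on version B (the rewrite author's own statement) =====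
-- stated objective: alternative
-- what changed: B replaces A's nested loops (outer over elements, inner while re-indexing tall) by a single flat pass over range(n*n) that computes each pair by index arithmetic: (x[k // n], tall[k % n]).
import Mathlib
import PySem

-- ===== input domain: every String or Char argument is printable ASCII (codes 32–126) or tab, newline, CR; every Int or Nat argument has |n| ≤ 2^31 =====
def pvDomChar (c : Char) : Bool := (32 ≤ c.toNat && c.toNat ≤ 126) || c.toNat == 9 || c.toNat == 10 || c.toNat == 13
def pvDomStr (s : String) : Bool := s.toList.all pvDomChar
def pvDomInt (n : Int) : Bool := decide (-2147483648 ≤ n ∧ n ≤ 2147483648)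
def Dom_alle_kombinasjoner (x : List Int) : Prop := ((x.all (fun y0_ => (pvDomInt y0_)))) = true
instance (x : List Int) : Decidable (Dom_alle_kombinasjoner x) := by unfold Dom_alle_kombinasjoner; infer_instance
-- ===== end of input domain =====

-- B computes each pair by index arithmetic over one flat range(n*n) pass,
-- (x[k // n], tall[k % n]), instead of A's nested loops (objective: alternative).

-- module constant tall = [1,2,3,4]
def tallA : List Int := [1, 2, 3, 4]

-- ===== PORT A =====
-- the 'while leng > count' loop with count starting at 0 is the iteration count = 0,1,…,leng-1;
-- tall[count] is pyGetD (exact inside Pre_, where count < 4 so no IndexError occurs)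
def alle_kombinasjoner (x : List Int) : List (Int × Int) :=
  let leng : Int := (x.length : Int)
  x.foldl (fun liste i =>
    (PySem.List.pyRange 0 leng 1).foldl (fun l count =>
      l ++ [(i, PySem.List.pyGetD tallA count 0)]) liste) []

-- ===== PORT B =====
-- x[k // n] and tall[k % n] are pyGetD (exact inside Pre_: k // n < n and k % n < n ≤ 4)
def alle_kombinasjoner_alt (x : List Int) : List (Int × Int) :=
  let n : Int := (x.length : Int)
  (PySem.List.pyRange 0 (n * n) 1).map (fun k =>
    (PySem.List.pyGetD x (PySem.Int.floordiv k n) 0,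
     PySem.List.pyGetD tallA (PySem.Int.mod k n) 0))

-- ===== PRECONDITION & SPEC =====
-- Pre_ excludes lists longer than tall (= 4 elements), on which both A and B raise IndexError.
def Pre_alle_kombinasjoner (x : List Int) : Prop := x.length ≤ 4

instance (x : List Int) : Decidable (Pre_alle_kombinasjoner x) := by
  unfold Pre_alle_kombinasjoner; infer_instance

def pvWitness_alle_kombinasjoner : List Int := [3, 1, 2]

def Spec_alle_kombinasjoner (x : List Int) (out : List (Int × Int)) : Prop := out = alle_kombinasjoner_alt x
instance (x : List Int) (out : List (Int × Int)) : Decidable (Spec_alle_kombinasjoner x out) := by unfold Spec_alle_kombinasjoner; infer_instance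

-- ===== CLAIM (what is proved, stated in full; the proofs are below) =====
def Claim_equal_alle_kombinasjoner : Prop := ∀ (x : List Int), Dom_alle_kombinasjoner x → Pre_alle_kombinasjoner x → Spec_alle_kombinasjoner x (alle_kombinasjoner x)

-- ===== LEMMAS AND PROOFS =====

-- A's inner loop: appending singletons over a list equals acc ++ the mapped list
theorem foldl_append_singleton {α β : Type} (g : α → β) (l : List α) (acc : List β) :
    l.foldl (fun r a => r ++ [g a]) acc = acc ++ l.map g := by
  induction l generalizing acc with
  | nil => simp
  | cons a t ih => simp [List.foldl_cons, ih, List.append_assoc]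

-- A's outer loop folds to acc ++ flatMap
theorem foldl_outer (x : List Int) (row : List Int) (acc : List (Int × Int)) :
    x.foldl (fun liste i => liste ++ row.map (fun t => (i, t))) acc
      = acc ++ x.flatMap (fun i => row.map (fun t => (i, t))) := by
  induction x generalizing acc with
  | nil => simp
  | cons a t ih => simp [List.foldl_cons, ih, List.append_assoc]

-- flat index range decomposed into blocks: range(m*n) with (k/n, k%n) is the double loop
theorem range_mul_div_mod {α : Type} (n : Nat) (f : Nat → Nat → α) :
    ∀ (m : Nat), (List.range (m * n)).map (fun k => f (k / n) (k % n))
      = (List.range m).flatMap (fun i => (List.range n).map (fun j => f i j)) := by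
  intro m
  induction m with
  | zero => simp
  | succ m ih =>
    have h : (m + 1) * n = m * n + n := by ring
    rw [h, List.range_add, List.map_append, ih, List.range_succ, List.flatMap_append,
      List.flatMap_cons, List.flatMap_nil, List.append_nil, List.map_map]
    congr 1
    apply List.map_congr_left
    intro j hj
    have hjn : j < n := List.mem_range.mp hj
    have hn : 0 < n := Nat.lt_of_le_of_lt (Nat.zero_le j) hjn
    have hd : (m * n + j) / n = m := by
      rw [Nat.add_comm, Nat.add_mul_div_right _ _ hn, Nat.div_eq_of_lt hjn, Nat.zero_add]
    have hm : (m * n + j) % n = j := by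
      rw [Nat.add_comm, Nat.add_mul_mod_self_right, Nat.mod_eq_of_lt hjn]
    simp [Function.comp, hd, hm]

-- reading x by index over range(len x) is x itself
theorem map_getD_range (x : List Int) :
    (List.range x.length).map (fun i => x.getD i 0) = x := by
  apply List.ext_getElem
  · simp
  · intro k h1 h2
    simp [List.getD_eq_getElem?_getD, List.getElem?_eq_getElem h2]

-- flatMap over indices of x equals flatMap over x
theorem flatMap_range_getD (x : List Int) (G : Int → List (Int × Int)) :
    (List.range x.length).flatMap (fun i => G (x.getD i 0)) = x.flatMap G := by
  conv_rhs => rw [← map_getD_range x]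
  rw [List.flatMap_map]

-- ===== VERDICT (by name: the statement is the Claim_ definition above) =====
theorem alle_kombinasjoner_spec : Claim_equal_alle_kombinasjoner := by
  intro x _ _
  unfold Spec_alle_kombinasjoner alle_kombinasjoner alle_kombinasjoner_alt
  simp only []
  set len := x.length with hlen
  -- A-side: nested folds become a flatMap of the row
  have hA : x.foldl (fun liste i =>
        (PySem.List.pyRange 0 (len : Int) 1).foldl (fun l count =>
          l ++ [(i, PySem.List.pyGetD tallA count 0)]) liste) []
      = x.flatMap (fun i => (List.range len).map (fun j => (i, tallA.getD j 0))) := by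
    have h1 : ∀ (i : Int) (l : List (Int × Int)),
        (PySem.List.pyRange 0 (len : Int) 1).foldl (fun r count =>
          r ++ [(i, PySem.List.pyGetD tallA count 0)]) l
        = l ++ (List.range len).map (fun j => (i, tallA.getD j 0)) := by
      intro i l
      rw [foldl_append_singleton (fun c => (i, PySem.List.pyGetD tallA c 0))]
      congr 1
      rw [PySem.List.pyRange_one, List.map_map]
      simp [Function.comp, PySem.List.pyGetD_natCast]
    calc x.foldl (fun liste i =>
          (PySem.List.pyRange 0 (len : Int) 1).foldl (fun l count =>
            l ++ [(i, PySem.List.pyGetD tallA count 0)]) liste) []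
        = x.foldl (fun liste i =>
            liste ++ ((List.range len).map (fun j => tallA.getD j 0)).map
              (fun t => (i, t))) [] := by
          apply PySem.List.foldl_congr_mem
          intro liste i _
          rw [h1 i liste, List.map_map]
          rfl
      _ = x.flatMap (fun i => (List.range len).map (fun j => (i, tallA.getD j 0))) := by
          rw [foldl_outer]
          simp [List.map_map, Function.comp_def]
  rw [hA]
  -- B-side: flat range with div/mod
  have hB : (PySem.List.pyRange 0 ((len : Int) * (len : Int)) 1).map (fun k =>
        (PySem.List.pyGetD x (PySem.Int.floordiv k (len : Int)) 0,
         PySem.List.pyGetD tallA (PySem.Int.mod k (len : Int)) 0))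
      = (List.range (len * len)).map (fun k =>
          (x.getD (k / len) 0, tallA.getD (k % len) 0)) := by
    rw [PySem.List.pyRange_one]
    have ht : (((len : Int) * (len : Int)) - 0).toNat = len * len := by
      rw [Int.sub_zero, ← Int.natCast_mul, Int.toNat_natCast]
    rw [ht, List.map_map]
    apply List.map_congr_left
    intro k _
    simp only [Function.comp, zero_add, PySem.Int.floordiv_natCast, PySem.Int.mod_natCast,
      PySem.List.pyGetD_natCast]
  rw [hB,
    range_mul_div_mod len (fun i j => (x.getD i 0, tallA.getD j 0)) len]
  exact (flatMap_range_getD x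
    (fun a => (List.range len).map (fun j => (a, tallA.getD j 0)))).symm
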